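-- pv_equiv track=rewrite | github.com/google/xls | xls/experimental/smtlib/n_bit_nested_mul_generator.py | get_concat_level_bits
-- ===== SOURCE A (Python) =====
-- def get_concat_level_bits(i, n, mul):
--   """Create a string combining the bits of the current mul.
--
--   Combine the bits of the multiplication of the current variable (at mul) by the
--   i-th index of the previous variable.
--
--   Args:
--     i: An integer, the index of the previous variable.
--     n: An integer, the number of bits in the bitvectors.
--     mul: An integer, the index of the nested mul we're at.
--
--   Returns:
--     The resulting concat string.
--   """
--   concats = []
--   if i > 0:
--     concats.append(f"(concat m_{mul}_{i}_{i} #b{'0' * i})")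
--   else:
--     concats.append(f"m_{mul}_0_0")
--   if i < (n - 1):
--     for j in range(i + 1, n):
--       rhs = concats[j - i - 1]
--       concat = ["(concat", f"m_{mul}_{i}_{j}", rhs + ")"]
--       concats.append(" ".join(concat))
--   return concats[-1]
-- ===== SOURCE B (Python) =====
-- def get_concat_level_bits(i, n, mul):
--   """Create a string combining the bits of the current mul.
--
--   Recursive descent: the level-j string wraps the level-(j-1) string, with the
--   base case at j <= i.
--   """
--   def var(j):
--     return f"m_{mul}_{i}_{j}"
--
--   def build(j):
--     if j <= i:
--       return f"(concat {var(i)} #b{'0' * i})" if i > 0 else f"m_{mul}_0_0"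
--     return f"(concat {var(j)} {build(j - 1)})"
--
--   return build(n - 1)
-- ===== Notes on version B (the rewrite author's own statement) =====
-- stated objective: alternative
-- what changed: Replaces A's iterative construction (append every nested level to a growing list, index the previous entry, join with spaces, return the last element) by a top-down recursive descent build(j) that wraps build(j-1) directly, with no list, no indexing and no join.
import Mathlib
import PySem

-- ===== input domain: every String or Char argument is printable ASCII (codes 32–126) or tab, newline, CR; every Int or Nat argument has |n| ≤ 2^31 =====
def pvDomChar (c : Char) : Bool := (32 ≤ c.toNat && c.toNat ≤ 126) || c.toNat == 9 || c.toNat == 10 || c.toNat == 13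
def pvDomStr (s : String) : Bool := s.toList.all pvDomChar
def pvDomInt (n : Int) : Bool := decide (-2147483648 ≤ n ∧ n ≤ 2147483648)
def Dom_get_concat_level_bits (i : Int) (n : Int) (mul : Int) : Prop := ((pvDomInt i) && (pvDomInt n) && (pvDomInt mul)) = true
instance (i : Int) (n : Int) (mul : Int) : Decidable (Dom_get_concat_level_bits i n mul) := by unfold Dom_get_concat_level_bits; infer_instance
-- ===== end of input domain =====

-- B replaces A's iterative list of accumulated nested prefixes (append each level, index the
-- previous one, return the last) by a top-down recursive descent on the level index;
-- equivalence is proved on all inputs.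

-- ===== PORT A =====
-- the i>0 / i==0 base string (the first element A appends to `concats`); '0'*i is pyRepeat
def pyA_base (i : Int) (mul : Int) : List Char :=
  if i > 0 then
    "(concat m_".toList ++ PySem.Int.toChars mul ++ "_".toList ++ PySem.Int.toChars i ++
      "_".toList ++ PySem.Int.toChars i ++ " #b".toList ++ PySem.List.pyRepeat ['0'] i ++ ")".toList
  else
    "m_".toList ++ PySem.Int.toChars mul ++ "_0_0".toList

-- one iteration of A's j-loop: concats.append(" ".join(["(concat", f"m_{mul}_{i}_{j}", rhs + ")"]))
-- rhs = concats[j-i-1]; pyGetD with default [] is exact here: the index is always in range (proved below)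
def pyA_step (i : Int) (mul : Int) (cs : List (List Char)) (j : Int) : List (List Char) :=
  let rhs := PySem.List.pyGetD cs (j - i - 1) []
  cs ++ [PySem.Chars.join " ".toList
          ["(concat".toList,
           "m_".toList ++ PySem.Int.toChars mul ++ "_".toList ++ PySem.Int.toChars i ++
             "_".toList ++ PySem.Int.toChars j,
           rhs ++ ")".toList]]

def get_concat_level_bits (i : Int) (n : Int) (mul : Int) : String :=
  let concats : List (List Char) := [pyA_base i mul]
  let concats :=
    if i < n - 1 then (PySem.List.pyRange (i + 1) n 1).foldl (pyA_step i mul) concats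
    else concats
  String.ofList (PySem.List.pyGetD concats (-1) [])  -- concats[-1]; never empty, so exact

-- ===== PORT B =====
-- var(j) = f"m_{mul}_{i}_{j}"
def pyB_var (mul : Int) (i : Int) (j : Int) : List Char :=
  "m_".toList ++ PySem.Int.toChars mul ++ "_".toList ++ PySem.Int.toChars i ++
    "_".toList ++ PySem.Int.toChars j

-- build(j), written as structural recursion on the depth d = j - i (j = i + d);
-- d = 0 is the j <= i base case of Source B (A never calls build with j < i reachable below the base)
def pyB_build (i : Int) (mul : Int) : Nat → List Char
  | 0 =>
    if i > 0 then
      "(concat ".toList ++ pyB_var mul i i ++ " #b".toList ++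
        PySem.List.pyRepeat ['0'] i ++ ")".toList
    else
      "m_".toList ++ PySem.Int.toChars mul ++ "_0_0".toList
  | d + 1 =>
    "(concat ".toList ++ pyB_var mul i (i + (d : Int) + 1) ++ " ".toList ++
      pyB_build i mul d ++ ")".toList

-- return build(n - 1): depth n - 1 - i (0 when n - 1 <= i, Source B's immediate base case)
def get_concat_level_bits_alt (i : Int) (n : Int) (mul : Int) : String :=
  String.ofList (pyB_build i mul (n - 1 - i).toNat)

-- ===== PRECONDITION & SPEC =====
def Spec_get_concat_level_bits (i : Int) (n : Int) (mul : Int) (out : String) : Prop := out = get_concat_level_bits_alt i n mul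
instance (i : Int) (n : Int) (mul : Int) (out : String) : Decidable (Spec_get_concat_level_bits i n mul out) := by unfold Spec_get_concat_level_bits; infer_instance

-- ===== CLAIM (what is proved, stated in full; the proofs are below) =====
def Claim_equal_get_concat_level_bits : Prop := ∀ (i : Int) (n : Int) (mul : Int), Dom_get_concat_level_bits i n mul → Spec_get_concat_level_bits i n mul (get_concat_level_bits i n mul)

-- ===== LEMMAS AND PROOFS =====

-- A's base equals B's depth-0 string
theorem base_eq (i mul : Int) : pyA_base i mul = pyB_build i mul 0 := by
  by_cases h : i > 0 <;> simp [pyA_base, pyB_build, pyB_var, h]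

-- A's step string equals B's wrapping shape
theorem pyA_step_join (i mul : Int) (j : Int) (rhs : List Char) :
    PySem.Chars.join " ".toList
      ["(concat".toList,
       "m_".toList ++ PySem.Int.toChars mul ++ "_".toList ++ PySem.Int.toChars i ++
         "_".toList ++ PySem.Int.toChars j,
       rhs ++ ")".toList]
      = "(concat ".toList ++ pyB_var mul i j ++ " ".toList ++ rhs ++ ")".toList := by
  simp [PySem.Chars.join, List.intercalate, pyB_var]

-- invariant of A's loop: after t iterations concats = [pyB_build 0, …, pyB_build t]
theorem pyA_fold_inv (i mul : Int) (t : Nat) :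
    ((List.range t).map (fun (k : Nat) => i + 1 + (k : Int))).foldl (pyA_step i mul) [pyA_base i mul]
      = (List.range (t + 1)).map (pyB_build i mul) := by
  induction t with
  | zero => simp [base_eq]
  | succ t ih =>
    rw [List.range_succ, List.map_append, List.foldl_append, ih]
    show pyA_step i mul _ _ = _
    rw [pyA_step]
    have hidx : (i + 1 + (t : Int)) - i - 1 = (t : Int) := by ring
    rw [hidx]
    have hget : PySem.List.pyGetD ((List.range (t + 1)).map (pyB_build i mul)) (t : Int) []
        = pyB_build i mul t := by
      rw [PySem.List.pyGetD_natCast]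
      simp [List.getD]
    rw [hget, pyA_step_join]
    rw [List.range_succ (n := t + 1), List.map_append]
    have : pyB_build i mul (t + 1)
        = "(concat ".toList ++ pyB_var mul i (i + 1 + (t : Int)) ++ " ".toList ++
            pyB_build i mul t ++ ")".toList := by
      rw [pyB_build]; ring_nf
    simp [this]

-- ===== VERDICT (by name: the statement is the Claim_ definition above) =====
theorem get_concat_level_bits_spec : Claim_equal_get_concat_level_bits := by
  intro i n mul _
  unfold Spec_get_concat_level_bits get_concat_level_bits get_concat_level_bits_alt
  by_cases h : i < n - 1
  · have hA : PySem.List.pyRange (i + 1) n 1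
        = (List.range (n - 1 - i).toNat).map (fun (k : Nat) => i + 1 + (k : Int)) := by
      rw [PySem.List.pyRange_one]
      congr 2
      omega
    simp only [h, if_pos]
    rw [hA, pyA_fold_inv]
    have hsplit : (List.range ((n - 1 - i).toNat + 1)).map (pyB_build i mul)
        = (List.range (n - 1 - i).toNat).map (pyB_build i mul) ++ [pyB_build i mul (n - 1 - i).toNat] := by
      rw [List.range_succ, List.map_append, List.map_singleton]
    rw [hsplit, PySem.List.pyGetD_neg_one_append_singleton]
  · have hN0 : (n - 1 - i).toNat = 0 := by omega
    simp only [h, if_neg, not_false_iff]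
    rw [hN0, show [pyA_base i mul] = [] ++ [pyA_base i mul] from rfl,
        PySem.List.pyGetD_neg_one_append_singleton, base_eq]
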